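-- pv_equiv track=rewrite | github.com/HyunAm0225/Python_Algorithm | 코테/test001.py | solution
-- ===== SOURCE A (Python) =====
-- def solution(name_list):
--     N = len(name_list)
--     for i in range(N):
--         str = ""
--         for p in range(N):
--             if(p==i):
--                 continue
--             str += name_list[p]
--         if(str.find(name_list[i]) != -1):
--             return True
--     return False
-- ===== SOURCE B (Python) =====
-- def solution(name_list):
--     # Online multi-start matcher: for each target name, stream the characters
--     # of all other names through it, tracking every partial-match length;
--     # no concatenated string is ever built.
--     for i, target in enumerate(name_list):
--         if not target:
--             return True
--         m = len(target)
--         active = []  # lengths k: target[:k] is a suffix of the stream read so far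
--         for j, other in enumerate(name_list):
--             if j != i:
--                 for c in other:
--                     active = [k + 1 for k in [0] + active if target[k] == c]
--                     if m in active:
--                         return True
--     return False
-- ===== Notes on version B (the rewrite author's own statement) =====
-- stated objective: alternative
-- what changed: B replaces A's per-index rebuild-the-concatenation-and-str.find approach with an online multi-start substring matcher: for each name it streams the characters of all other names one by one, maintaining the list of partial-match lengths, and never builds any concatenated string.
import Mathlib
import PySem

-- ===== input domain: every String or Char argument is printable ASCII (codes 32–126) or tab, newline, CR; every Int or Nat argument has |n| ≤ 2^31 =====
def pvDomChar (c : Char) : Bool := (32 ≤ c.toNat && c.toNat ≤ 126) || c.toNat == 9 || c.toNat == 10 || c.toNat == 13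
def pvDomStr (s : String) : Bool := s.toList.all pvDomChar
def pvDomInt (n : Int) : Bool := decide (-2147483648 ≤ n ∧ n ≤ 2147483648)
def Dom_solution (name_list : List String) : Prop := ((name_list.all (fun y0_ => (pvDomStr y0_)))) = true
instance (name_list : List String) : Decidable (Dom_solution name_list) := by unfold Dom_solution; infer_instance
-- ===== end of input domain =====

-- B is an alternative algorithm: an online multi-start matcher that streams the
-- characters of the other names, tracking partial-match lengths, instead of
-- A's per-index rebuilt concatenation searched with str.find.

-- ===== PORT A =====
-- strings are ported through List Char (PySem.Chars), as PYSEM.md prescribes;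
-- name_list[p] with p drawn from range(N) is always in range, so pyGetD with default "" is exact.
def solA (name_list : List String) (N : Int) : List Int → Bool
  | [] => false
  | i :: rest =>
    let str := (PySem.List.pyRange 0 N 1).foldl
      (fun acc p => if p == i then acc else acc ++ (PySem.List.pyGetD name_list p "").toList) []
    if PySem.Chars.find str (PySem.List.pyGetD name_list i "").toList ≠ -1 then
      true
    else solA name_list N rest

def solution (name_list : List String) : Bool :=
  solA name_list (name_list.length : Int) (PySem.List.pyRange 0 (name_list.length : Int) 1)

-- ===== PORT B =====
-- inner character loop of Source B: active = [k+1 for k in [0]+active if target[k]==c];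
-- every k reaching target[k] satisfies k < len(target) (invariant of the matcher),
-- so the getD default 'a' is never used and the indexing is exact.
def bChars (target : List Char) (m : Nat) : List Nat → List Char → Bool × List Nat
  | active, [] => (false, active)
  | active, c :: cs =>
    let active' := ((0 :: active).filter (fun k => target.getD k 'a' == c)).map (· + 1)
    if active'.contains m then (true, active')
    else bChars target m active' cs

-- middle loop of Source B: for j, other in enumerate(name_list): if j != i: …
def bNames (target : List Char) (m i : Nat) : Nat → List Nat → List String → Bool
  | _, _, [] => false
  | j, active, other :: rest =>
    if j ≠ i then
      match bChars target m active other.toList with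
      | (true, _) => true
      | (false, active') => bNames target m i (j + 1) active' rest
    else bNames target m i (j + 1) active rest

-- outer loop of Source B: for i, target in enumerate(name_list): …
def bOuter (name_list : List String) : Nat → List String → Bool
  | _, [] => false
  | i, name :: rest =>
    if name.toList = [] then true
    else if bNames name.toList name.toList.length i 0 [] name_list then true
    else bOuter name_list (i + 1) rest

def solution_alt (name_list : List String) : Bool := bOuter name_list 0 name_list

-- ===== PRECONDITION & SPEC =====
def Spec_solution (name_list : List String) (out : Bool) : Prop := out = solution_alt name_list
instance (name_list : List String) (out : Bool) : Decidable (Spec_solution name_list out) := by unfold Spec_solution; infer_instance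

-- ===== CLAIM (what is proved, stated in full; the proofs are below) =====
def Claim_equal_solution : Prop := ∀ (name_list : List String), Dom_solution name_list → Spec_solution name_list (solution name_list)

-- ===== LEMMAS AND PROOFS =====

-- concatenation of all strings in l, as characters
def joinAll (l : List String) : List Char := l.flatMap String.toList

-- reference form both loops are reduced to
def refF (pre : List Char) : List String → Bool
  | [] => false
  | n :: rest =>
    if PySem.Chars.isIn n.toList (pre ++ joinAll rest) then true
    else refF (pre ++ n.toList) rest

-- ---------- A-side reduction to refF (as in a straightforward index recursion) ----------

theorem seg_fold' (l : List String) (i : Int) (c : Nat) (hc : c ≤ l.length) :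
    ∀ (k a : Nat) (acc : List Char), c - a = k → a ≤ c →
      (∀ p : Int, (a : Int) ≤ p → p < (c : Int) → p ≠ i) →
      (PySem.List.pyRange (a : Int) (c : Int) 1).foldl
        (fun acc p => if p == i then acc else acc ++ (PySem.List.pyGetD l p "").toList) acc
      = acc ++ joinAll ((l.take c).drop a) := by
  intro k
  induction k with
  | zero =>
    intro a acc hk ha _
    have hac : a = c := by omega
    subst hac
    rw [PySem.List.pyRange_one_eq_nil (by omega)]
    simp [joinAll, List.drop_eq_nil_of_le, List.length_take]
  | succ k ih =>
    intro a acc hk ha hne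
    have hlt : a < c := by omega
    rw [PySem.List.pyRange_one_cons (by exact_mod_cast hlt)]
    simp only [List.foldl_cons]
    have hpa : ((a : Int) == i) = false := by
      simp only [beq_eq_false_iff_ne]
      exact hne a (le_refl _) (by exact_mod_cast hlt)
    rw [hpa]
    simp only [Bool.false_eq_true, if_false]
    have halen : a < l.length := by omega
    have hget : PySem.List.pyGetD l (a : Int) "" = l[a] := by
      simp [PySem.List.pyGetD_natCast l a "" , halen]
    have : ((a : Int) + 1) = ((a + 1 : Nat) : Int) := by push_cast; ring
    rw [hget, this, ih (a+1) (acc ++ (l[a]).toList) (by omega) (by omega)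
        (fun p hp1 hp2 => hne p (by push_cast at hp1 ⊢; omega) hp2)]
    have hdrop : (l.take c).drop a = l[a] :: (l.take c).drop (a+1) := by
      rw [List.drop_eq_getElem_cons (by simp [List.length_take]; omega)]
      congr 1
      simp [List.getElem_take]
    rw [hdrop]
    simp [joinAll]

theorem inner_fold (l : List String) (i : Nat) (hi : i < l.length) :
    (PySem.List.pyRange 0 (l.length : Int) 1).foldl
      (fun acc p => if p == (i : Int) then acc else acc ++ (PySem.List.pyGetD l p "").toList) []
    = joinAll (l.take i) ++ joinAll (l.drop (i+1)) := by
  rw [PySem.List.pyRange_one_append 0 (i : Int) (l.length : Int) (by omega) (by omega),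
      PySem.List.pyRange_one_cons (a := (i : Int)) (by exact_mod_cast hi),
      List.foldl_append, List.foldl_cons]
  have h0 : ((0 : Int)) = ((0 : Nat) : Int) := rfl
  rw [h0, seg_fold' l (i : Int) i (by omega) i 0 [] (by omega) (by omega)
        (fun p hp1 hp2 => by omega)]
  simp only [List.drop_zero, List.nil_append, beq_self_eq_true, if_true]
  have : ((i : Int) + 1) = ((i + 1 : Nat) : Int) := by push_cast; ring
  rw [this, seg_fold' l (i : Int) l.length (le_refl _) (l.length - (i+1)) (i+1)
        _ (by omega) (by omega) (fun p hp1 hp2 => by push_cast at hp1; omega)]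
  rw [List.take_length]

theorem solA_eq_refF' (l : List String) :
    ∀ (k i : Nat), l.length - i = k → i ≤ l.length →
      solA l (l.length : Int) (PySem.List.pyRange (i : Int) (l.length : Int) 1)
        = refF (joinAll (l.take i)) (l.drop i) := by
  intro k
  induction k with
  | zero =>
    intro i hk hi
    have : i = l.length := by omega
    subst this
    rw [PySem.List.pyRange_one_eq_nil (by omega)]
    simp [solA, refF, List.drop_length]
  | succ k ih =>
    intro i hk hi
    have hlt : i < l.length := by omega
    rw [PySem.List.pyRange_one_cons (by exact_mod_cast hlt)]
    rw [solA]
    rw [inner_fold l i hlt]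
    have hget : PySem.List.pyGetD l (i : Int) "" = l[i] := by
      simp [PySem.List.pyGetD_natCast l i "", hlt]
    rw [hget]
    have hdrop : l.drop i = l[i] :: l.drop (i+1) := List.drop_eq_getElem_cons hlt
    rw [hdrop, refF]
    have htake : l.take (i+1) = l.take i ++ [l[i]] := by
      rw [List.take_add_one]; simp [hlt]
    have hstep : ((i : Int) + 1) = ((i + 1 : Nat) : Int) := by push_cast; ring
    by_cases h : (l[i]).toList <:+: (joinAll (l.take i) ++ joinAll (l.drop (i+1)))
    · rw [if_pos (by rw [Ne, PySem.Chars.find_eq_neg_one_iff]; simpa using h),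
          if_pos (by rw [PySem.Chars.isIn_iff_infix]; exact h)]
    · rw [if_neg (by rw [Ne, PySem.Chars.find_eq_neg_one_iff]; simpa using h),
          if_neg (by rw [PySem.Chars.isIn_iff_infix]; exact h)]
      rw [hstep, ih (i+1) (by omega) (by omega)]
      simp only [joinAll]
      rw [htake, List.flatMap_append]
      simp

-- ---------- B-side correctness of the streaming matcher ----------

-- u ++ [x] is a suffix of p ++ [c] iff x = c and u is a suffix of p
theorem suffix_snoc_iff (u p : List Char) (x c : Char) :
    u ++ [x] <:+ p ++ [c] ↔ x = c ∧ u <:+ p := by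
  constructor
  · rintro ⟨t, h⟩
    have h' : (t ++ u) ++ [x] = p ++ [c] := by simpa [List.append_assoc] using h
    have hx : x = c ∧ t ++ u = p := by
      have := List.append_inj' h' rfl
      exact ⟨by simpa using this.2, this.1⟩
    exact ⟨hx.1, ⟨t, hx.2⟩⟩
  · rintro ⟨rfl, t, rfl⟩
    exact ⟨t, by simp [List.append_assoc]⟩

-- take (k+1) suffix characterization
theorem take_succ_suffix_iff (tg p : List Char) (c : Char) (k : Nat) (hk : k < tg.length) :
    tg.take (k+1) <:+ p ++ [c] ↔ tg.take k <:+ p ∧ tg[k] = c := by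
  have h1 : tg.take (k+1) = tg.take k ++ [tg[k]] := by
    rw [List.take_add_one]; simp [hk]
  rw [h1, suffix_snoc_iff]
  tauto

-- infix of p ++ [c] decomposes
theorem infix_snoc_iff (tg p : List Char) (c : Char) :
    tg <:+: p ++ [c] ↔ tg <:+: p ∨ tg <:+ p ++ [c] := by
  constructor
  · rintro ⟨a, b, h⟩
    rcases List.eq_nil_or_concat b with rfl | ⟨b', c', rfl⟩
    · right; exact ⟨a, by simpa using h⟩
    · left
      have h' : (a ++ tg ++ b') ++ [c'] = p ++ [c] := by
        simpa [List.append_assoc] using h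
      have := (List.append_inj' h' rfl).1
      exact ⟨a, b', this⟩
  · rintro (h | h)
    · exact h.trans ⟨[], [c], by simp⟩
    · exact h.isInfix

-- the matcher invariant: active holds exactly the partial-match lengths
theorem bChars_correct (tg : List Char) (htg : tg ≠ []) :
    ∀ (cs p : List Char) (active : List Nat),
      (∀ k, k ∈ active ↔ (1 ≤ k ∧ k < tg.length ∧ tg.take k <:+ p)) →
      ¬ tg <:+: p →
      ((bChars tg tg.length active cs).1 = true ↔ tg <:+: (p ++ cs)) ∧
      ((bChars tg tg.length active cs).1 = false →
        (∀ k, k ∈ (bChars tg tg.length active cs).2 ↔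
            (1 ≤ k ∧ k < tg.length ∧ tg.take k <:+ (p ++ cs))) ∧ ¬ tg <:+: (p ++ cs)) := by
  have hlen : 1 ≤ tg.length := by
    cases tg with
    | nil => exact absurd rfl htg
    | cons a t => simp
  intro cs
  induction cs with
  | nil =>
    intro p active hInv hninf
    refine ⟨?_, ?_⟩
    · simp [bChars, hninf]
    · intro _
      simpa using ⟨hInv, hninf⟩
  | cons c cs ih =>
    intro p active hInv hninf
    have hmem : ∀ x, x ∈ ((0 :: active).filter (fun k => tg.getD k 'a' == c)).map (· + 1) ↔
        (1 ≤ x ∧ x ≤ tg.length ∧ tg.take x <:+ p ++ [c]) := by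
      intro x
      simp only [List.mem_map, List.mem_filter, List.mem_cons, beq_iff_eq]
      constructor
      · rintro ⟨k, ⟨hk0 | hk, hq⟩, rfl⟩
        · subst hk0
          have h0 : (0:Nat) < tg.length := hlen
          rw [List.getD_eq_getElem _ _ h0] at hq
          refine ⟨by omega, by omega, ?_⟩
          exact (take_succ_suffix_iff tg p c 0 h0).2 ⟨by simp, hq⟩
        · obtain ⟨h1, h2, h3⟩ := (hInv k).1 hk
          rw [List.getD_eq_getElem _ _ h2] at hq
          refine ⟨by omega, by omega, ?_⟩
          exact (take_succ_suffix_iff tg p c k h2).2 ⟨h3, hq⟩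
      · rintro ⟨h1, h2, h3⟩
        obtain ⟨k, rfl⟩ : ∃ k, x = k + 1 := ⟨x - 1, by omega⟩
        have hk : k < tg.length := by omega
        obtain ⟨hs, hc⟩ := (take_succ_suffix_iff tg p c k hk).1 h3
        refine ⟨k, ⟨?_, by rw [List.getD_eq_getElem _ _ hk]; exact hc⟩, rfl⟩
        rcases Nat.eq_zero_or_pos k with rfl | hkpos
        · exact Or.inl rfl
        · exact Or.inr ((hInv k).2 ⟨hkpos, hk, hs⟩)
    have hmdet : (((0 :: active).filter (fun k => tg.getD k 'a' == c)).map (· + 1)).contains tg.length = true ↔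
        tg <:+ p ++ [c] := by
      rw [List.contains_iff_mem, hmem]
      constructor
      · rintro ⟨_, _, h⟩; simpa [List.take_length] using h
      · intro h; exact ⟨hlen, le_refl _, by simpa [List.take_length] using h⟩
    show ((if _ then _ else _ : Bool × List Nat).1 = true ↔ _) ∧ _
    by_cases hc : (((0 :: active).filter (fun k => tg.getD k 'a' == c)).map (· + 1)).contains tg.length = true
    · rw [bChars]
      simp only [hc, if_true]
      have hsuf : tg <:+ p ++ [c] := hmdet.1 hc
      constructor
      · simp only [true_iff]
        have : tg <:+: (p ++ [c]) := hsuf.isInfix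
        have h2 : (p ++ [c]) <:+: ((p ++ [c]) ++ cs) := ⟨[], cs, by simp⟩
        have := this.trans h2
        simpa [List.append_assoc] using this
      · intro h; simp at h
    · rw [bChars]
      simp only [hc]
      have hnm : tg.length ∉ (((0 :: active).filter (fun k => tg.getD k 'a' == c)).map (· + 1)) := by
        intro hmm
        exact hc (by rwa [List.contains_iff_mem])
      have hInv' : ∀ k, k ∈ (((0 :: active).filter (fun k => tg.getD k 'a' == c)).map (· + 1)) ↔
          (1 ≤ k ∧ k < tg.length ∧ tg.take k <:+ (p ++ [c])) := by
        intro k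
        rw [hmem]
        constructor
        · rintro ⟨h1, h2, h3⟩
          refine ⟨h1, ?_, h3⟩
          rcases lt_or_eq_of_le h2 with h | rfl
          · exact h
          · exact absurd ((hmem _).2 ⟨h1, h2, h3⟩) hnm
        · rintro ⟨h1, h2, h3⟩; exact ⟨h1, by omega, h3⟩
      have hninf' : ¬ tg <:+: (p ++ [c]) := by
        rw [infix_snoc_iff]
        rintro (h | h)
        · exact hninf h
        · exact hc (hmdet.2 h)
      have := ih (p ++ [c]) _ hInv' hninf'
      simpa [List.append_assoc] using this

-- the middle loop over names: stream of the names at positions ≠ i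
def skipStream (i : Nat) : Nat → List String → List Char
  | _, [] => []
  | j, s :: r => (if j ≠ i then s.toList else []) ++ skipStream i (j + 1) r

theorem bNames_correct (tg : List Char) (htg : tg ≠ []) (i : Nat) :
    ∀ (ns : List String) (j : Nat) (active : List Nat) (p : List Char),
      (∀ k, k ∈ active ↔ (1 ≤ k ∧ k < tg.length ∧ tg.take k <:+ p)) →
      ¬ tg <:+: p →
      (bNames tg tg.length i j active ns = true ↔ tg <:+: (p ++ skipStream i j ns)) := by
  intro ns
  induction ns with
  | nil =>
    intro j active p hInv hninf
    simp [bNames, skipStream, hninf]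
  | cons other rest ih =>
    intro j active p hInv hninf
    rw [bNames, skipStream]
    by_cases hj : j ≠ i
    · rw [if_pos hj, if_pos hj]
      obtain ⟨h1, h2⟩ := bChars_correct tg htg other.toList p active hInv hninf
      rcases hfst : (bChars tg tg.length active other.toList) with ⟨b, active'⟩
      rw [hfst] at h1 h2
      cases b with
      | true =>
        have hin : tg <:+: (p ++ other.toList) := h1.1 rfl
        have h3 : (p ++ other.toList) <:+: ((p ++ other.toList) ++ skipStream i (j+1) rest) :=
          ⟨[], skipStream i (j+1) rest, by simp⟩
        have h4 := hin.trans h3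
        constructor
        · intro _
          simpa [List.append_assoc] using h4
        · intro _
          rfl
      | false =>
        obtain ⟨hInv', hninf'⟩ := h2 rfl
        have := ih (j+1) active' (p ++ other.toList) hInv' hninf'
        simpa [List.append_assoc] using this
    · rw [if_neg hj, if_neg hj]
      simp only [List.nil_append]
      exact ih (j+1) active p hInv hninf

theorem skipStream_gt (i : Nat) : ∀ (ns : List String) (j : Nat), i < j →
    skipStream i j ns = joinAll ns := by
  intro ns
  induction ns with
  | nil => intro j _; simp [skipStream, joinAll]
  | cons s r ih =>
    intro j hj
    rw [skipStream, ih (j+1) (by omega)]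
    have : (j ≠ i) = True := by simp; omega
    simp [this, joinAll]

theorem skipStream_le (i : Nat) : ∀ (ns : List String) (j : Nat), j ≤ i →
    skipStream i j ns = joinAll (ns.take (i - j)) ++ joinAll (ns.drop (i - j + 1)) := by
  intro ns
  induction ns with
  | nil => intro j _; simp [skipStream, joinAll]
  | cons s r ih =>
    intro j hj
    rw [skipStream]
    rcases eq_or_lt_of_le hj with rfl | hlt
    · rw [if_neg (by simp), skipStream_gt j r (j+1) (by omega)]
      simp [joinAll]
    · rw [if_pos (by omega), ih (j+1) (by omega)]
      have hd : i - j = (i - (j+1)) + 1 := by omega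
      rw [hd]
      simp [joinAll, List.take_succ_cons, List.drop_succ_cons, List.append_assoc]

-- the outer loop: bOuter agrees with the reference form refF
theorem bOuter_eq_refF (l : List String) :
    ∀ (k i : Nat), l.length - i = k → i ≤ l.length →
      bOuter l i (l.drop i) = refF (joinAll (l.take i)) (l.drop i) := by
  intro k
  induction k with
  | zero =>
    intro i hk hi
    have : i = l.length := by omega
    subst this
    simp [bOuter, refF, List.drop_length]
  | succ k ih =>
    intro i hk hi
    have hlt : i < l.length := by omega
    have hdrop : l.drop i = l[i] :: l.drop (i+1) := List.drop_eq_getElem_cons hlt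
    rw [hdrop, bOuter, refF]
    by_cases hn : (l[i]).toList = []
    · rw [if_pos hn, hn, if_pos (by rw [PySem.Chars.isIn_nil])]
    · rw [if_neg hn]
      have hinv : ∀ m, m ∈ ([] : List Nat) ↔
          (1 ≤ m ∧ m < (l[i]).toList.length ∧ (l[i]).toList.take m <:+ ([] : List Char)) := by
        intro m
        simp only [List.not_mem_nil, false_iff]
        rintro ⟨h1, h2, h3⟩
        have := List.suffix_nil.1 h3
        rw [List.take_eq_nil_iff] at this
        rcases this with h | h
        · omega
        · exact hn h
      have hninf : ¬ (l[i]).toList <:+: ([] : List Char) := by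
        rw [List.infix_nil]
        exact hn
      have hiff := bNames_correct (l[i]).toList hn i l 0 [] [] hinv hninf
      rw [skipStream_le i l 0 (by omega)] at hiff
      simp only [Nat.sub_zero, List.nil_append] at hiff
      have hb : bNames (l[i]).toList (l[i]).toList.length i 0 [] l =
          PySem.Chars.isIn (l[i]).toList (joinAll (l.take i) ++ joinAll (l.drop (i+1))) := by
        by_cases hin : (l[i]).toList <:+: (joinAll (l.take i) ++ joinAll (l.drop (i+1)))
        · rw [hiff.2 hin, (PySem.Chars.isIn_iff_infix _ _).2 hin]
        · have h1 : bNames (l[i]).toList (l[i]).toList.length i 0 [] l = false := by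
            cases h : bNames (l[i]).toList (l[i]).toList.length i 0 [] l
            · rfl
            · exact absurd (hiff.1 h) hin
          rw [h1, (PySem.Chars.isIn_eq_false_iff _ _).2 hin]
      rw [hb]
      by_cases hcond : PySem.Chars.isIn (l[i]).toList (joinAll (l.take i) ++ joinAll (l.drop (i+1))) = true
      · rw [if_pos hcond, if_pos hcond]
      · rw [if_neg hcond, if_neg hcond]
        have htake : joinAll (l.take (i+1)) = joinAll (l.take i) ++ (l[i]).toList := by
          have : l.take (i+1) = l.take i ++ [l[i]] := by
            rw [List.take_add_one]; simp [hlt]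
          simp only [joinAll]
          rw [this, List.flatMap_append]
          simp
        have := ih (i+1) (by omega) (by omega)
        rw [htake] at this
        exact this

-- ===== VERDICT (by name: the statement is the Claim_ definition above) =====
theorem solution_spec : Claim_equal_solution := by
  intro l _
  unfold Spec_solution solution solution_alt
  have hA := solA_eq_refF' l l.length 0 (by omega) (by omega)
  have hB := bOuter_eq_refF l l.length 0 (by omega) (by omega)
  simp only [List.drop_zero, List.take_zero, Nat.cast_zero] at hA hB
  rw [show joinAll [] = [] from rfl] at hA hB
  rw [hA, hB]
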